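-- pv_equiv track=rewrite | github.com/bartongroup/SM_VarAlign | varalign/stats.py | fill_variant_count
-- ===== SOURCE A (Python) =====
-- def fill_variant_count(value_counts, length):
--     """
--     Reformat Series.value_counts().
--
--     Order an alignment column number value counts Series by alignment column and insert 0s for any unobserved columns.
--
--     :param value_counts: `alignment_col_num`.value_counts() Series
--     :param length: The length of the alignment.
--     :return:
--     """
--     variants_per_pos = []
--     for i in range(length):
--         col_pos = i + 1
--         try:
--             variants_per_pos.append((col_pos, value_counts[col_pos]))
--         except KeyError:
--             variants_per_pos.append((col_pos, 0))
--     return variants_per_pos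
-- ===== SOURCE B (Python) =====
-- def fill_variant_count(value_counts, length):
--     """Preallocate (pos, 0) slots for pos in 1..length, then scatter the
--     observed counts into their slots in one pass over the dict items."""
--     result = [(pos, 0) for pos in range(1, length + 1)]
--     for idx, count in value_counts.items():
--         if 1 <= idx <= length:
--             result[idx - 1] = (idx, count)
--     return result
-- ===== Notes on version B (the rewrite author's own statement) =====
-- stated objective: alternative
-- what changed: Instead of probing the dict once per position with try/except (gather), B preallocates the full list of (pos, 0) slots and makes a single pass over value_counts.items(), scattering each in-range count into its slot.
import Mathlib
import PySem

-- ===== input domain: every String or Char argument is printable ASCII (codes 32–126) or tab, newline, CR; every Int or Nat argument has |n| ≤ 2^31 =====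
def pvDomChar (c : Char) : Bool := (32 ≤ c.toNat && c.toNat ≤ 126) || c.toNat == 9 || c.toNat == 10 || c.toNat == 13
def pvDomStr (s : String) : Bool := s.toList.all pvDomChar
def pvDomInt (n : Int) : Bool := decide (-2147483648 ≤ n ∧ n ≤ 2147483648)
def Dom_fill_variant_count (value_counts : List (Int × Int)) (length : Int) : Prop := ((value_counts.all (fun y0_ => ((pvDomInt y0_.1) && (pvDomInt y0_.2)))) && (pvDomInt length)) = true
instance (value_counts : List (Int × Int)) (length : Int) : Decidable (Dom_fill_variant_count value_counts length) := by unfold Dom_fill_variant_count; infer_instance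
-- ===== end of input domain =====

-- B replaces A's per-position dict probe with try/except by a preallocated zero
-- list plus one scatter pass over the observed entries (alternative, not faster).

-- ===== PORT A =====
-- for i in range(length): col_pos = i + 1; try append (col_pos, value_counts[col_pos]) except KeyError append (col_pos, 0)
def fill_variant_count (value_counts : List (Int × Int)) (length : Int) : List (Int × Int) :=
  (PySem.List.pyRange 0 length 1).foldl (fun acc i =>
    let col_pos := i + 1
    match value_counts.find? (fun p => p.1 == col_pos) with
    | some p => acc ++ [(col_pos, p.2)]      -- lookup succeeded
    | none   => acc ++ [(col_pos, 0)]        -- KeyError branch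
    ) []

-- ===== PORT B =====
def fill_variant_count_alt (value_counts : List (Int × Int)) (length : Int) : List (Int × Int) :=
  let result := (PySem.List.pyRange 1 (length + 1) 1).map (fun pos => (pos, (0 : Int)))
  value_counts.foldl (fun res p =>
    if 1 ≤ p.1 ∧ p.1 ≤ length then res.set (p.1 - 1).toNat (p.1, p.2) else res) result

-- ===== PRECONDITION & SPEC =====
-- Pre_ restricts value_counts to association lists with pairwise-distinct keys — the only
-- lists that represent a Python dict (value_counts is a value_counts() Series / dict, whose
-- keys are necessarily unique); on duplicate-key lists A's first-match lookup and B's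
-- last-write order are both accidental.
def Pre_fill_variant_count (value_counts : List (Int × Int)) (length : Int) : Prop :=
  (value_counts.map Prod.fst).Nodup
instance (value_counts : List (Int × Int)) (length : Int) : Decidable (Pre_fill_variant_count value_counts length) := by unfold Pre_fill_variant_count; infer_instance

def pvWitness_fill_variant_count : (List (Int × Int)) × Int := ([(1, 3), (4, 2)], 5)

def Spec_fill_variant_count (value_counts : List (Int × Int)) (length : Int) (out : List (Int × Int)) : Prop := out = fill_variant_count_alt value_counts length
instance (value_counts : List (Int × Int)) (length : Int) (out : List (Int × Int)) : Decidable (Spec_fill_variant_count value_counts length out) := by unfold Spec_fill_variant_count; infer_instance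

-- ===== CLAIM (what is proved, stated in full; the proofs are below) =====
def Claim_equal_fill_variant_count : Prop := ∀ (value_counts : List (Int × Int)) (length : Int), Dom_fill_variant_count value_counts length → Pre_fill_variant_count value_counts length → Spec_fill_variant_count value_counts length (fill_variant_count value_counts length)

-- ===== LEMMAS AND PROOFS =====

-- A as a map over the range
theorem fvc_A_eq_map (vc : List (Int × Int)) (length : Int) :
    fill_variant_count vc length =
      (PySem.List.pyRange 0 length 1).map (fun i =>
        (i + 1, ((vc.find? (fun p => p.1 == i + 1)).map Prod.snd).getD 0)) := by
  unfold fill_variant_count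
  rw [show (fun (acc : List (Int × Int)) (i : Int) =>
      match vc.find? (fun p => p.1 == i + 1) with
      | some p => acc ++ [(i + 1, p.2)]
      | none   => acc ++ [(i + 1, (0:Int))]) =
      (fun acc i => acc ++ [(i + 1, ((vc.find? (fun p => p.1 == i + 1)).map Prod.snd).getD 0)]) from by
    funext acc i
    cases vc.find? (fun p => p.1 == i + 1) <;> simp]
  simpa using PySem.List.foldl_append_singleton_eq_map (fun i => ((i:Int) + 1, ((vc.find? (fun p => p.1 == i + 1)).map Prod.snd).getD 0)) (PySem.List.pyRange 0 length 1) []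

theorem fvc_step_length (vc : List (Int × Int)) (length : Int) (res : List (Int × Int)) :
    (vc.foldl (fun res p =>
      if 1 ≤ p.1 ∧ p.1 ≤ length then res.set (p.1 - 1).toNat (p.1, p.2) else res) res).length
      = res.length := by
  induction vc generalizing res with
  | nil => rfl
  | cons a t ih =>
    simp only [List.foldl_cons]
    rw [ih]
    split_ifs <;> simp

-- elementwise description of B's scatter loop on a nodup-key list
theorem fvc_foldl_set_getElem (length : Int) (vc : List (Int × Int))
    (res : List (Int × Int)) (k : Nat)
    (hnd : (vc.map Prod.fst).Nodup) (hres : res.length = length.toNat)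
    (hk : k < length.toNat) :
    (vc.foldl (fun res p =>
      if 1 ≤ p.1 ∧ p.1 ≤ length then res.set (p.1 - 1).toNat (p.1, p.2) else res) res)[k]? =
      match vc.find? (fun p => p.1 == (k : Int) + 1) with
      | some p => some ((k : Int) + 1, p.2)
      | none   => res[k]? := by
  induction vc generalizing res with
  | nil => simp
  | cons a t ih =>
    simp only [List.map_cons, List.nodup_cons] at hnd
    obtain ⟨ha, hndt⟩ := hnd
    have hkL : (k : Int) < length := by omega
    simp only [List.foldl_cons, List.find?_cons]
    by_cases hkey : a.1 = (k : Int) + 1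
    · -- a writes slot k; no later entry touches it (nodup)
      have hcond : 1 ≤ a.1 ∧ a.1 ≤ length := by omega
      have hset : (if 1 ≤ a.1 ∧ a.1 ≤ length then res.set (a.1 - 1).toNat (a.1, a.2) else res)
          = res.set k (a.1, a.2) := by
        rw [if_pos hcond]; congr 1; omega
      have hfind : t.find? (fun p => p.1 == (k : Int) + 1) = none := by
        rw [List.find?_eq_none]
        intro p hp
        simp only [beq_iff_eq]
        intro hpk
        apply ha
        have hm : p.1 ∈ t.map Prod.fst := List.mem_map_of_mem hp
        rwa [hpk, ← hkey] at hm
      rw [hset, ih (res.set k (a.1, a.2)) hndt (by simp [hres]), hfind]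
      have hklt : k < res.length := by omega
      simp [hkey, hklt]
    · -- a leaves slot k unchanged
      have hne : (a.1 == (k : Int) + 1) = false := by simp [hkey]
      by_cases hc : 1 ≤ a.1 ∧ a.1 ≤ length
      · rw [if_pos hc, ih (res.set (a.1 - 1).toNat (a.1, a.2)) hndt (by simp [hres]), hne]
        cases t.find? (fun p => p.1 == (k : Int) + 1)
        · simp only []
          rw [List.getElem?_set_ne (by omega)]
        · simp
      · rw [if_neg hc, ih res hndt hres, hne]

-- ===== VERDICT (by name: the statement is the Claim_ definition above) =====
theorem fill_variant_count_spec : Claim_equal_fill_variant_count := by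
  intro vc length _hdom hpre
  unfold Spec_fill_variant_count
  rw [fvc_A_eq_map]
  unfold fill_variant_count_alt
  apply List.ext_getElem?
  intro k
  have hlenA : ((PySem.List.pyRange 0 length 1).map (fun i =>
      (i + 1, ((vc.find? (fun p => p.1 == i + 1)).map Prod.snd).getD 0))).length = length.toNat := by
    simp [PySem.List.length_pyRange_one]
  have hres : ((PySem.List.pyRange 1 (length + 1) 1).map (fun pos => (pos, (0 : Int)))).length
      = length.toNat := by
    simp [PySem.List.length_pyRange_one]
  by_cases hk : k < length.toNat
  · rw [fvc_foldl_set_getElem length vc _ k hpre hres hk]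
    rw [List.getElem?_eq_getElem (by omega), List.getElem_map, PySem.List.getElem_pyRange_one]
    cases hf : vc.find? (fun p => p.1 == (0 : Int) + (k : Int) + 1) with
    | some p =>
      have hf' : vc.find? (fun p => p.1 == (k : Int) + 1) = some p := by
        rw [← hf]; congr 1; funext p; congr 1; omega
      simp only [hf', Option.map_some, Option.getD_some, Option.some.injEq, Prod.mk.injEq, and_true]
      ring
    | none =>
      have hf' : vc.find? (fun p => p.1 == (k : Int) + 1) = none := by
        rw [← hf]; congr 1; funext p; congr 1; omega
      simp only [hf', Option.map_none, Option.getD_none]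
      rw [List.getElem?_eq_getElem (by omega), List.getElem_map, PySem.List.getElem_pyRange_one]
      simp only [Option.some.injEq, Prod.mk.injEq, and_true]
      ring
  · rw [List.getElem?_eq_none (by omega),
      List.getElem?_eq_none (by rw [fvc_step_length]; omega)]
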